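-- pv_equiv track=rewrite | github.com/Muthres-1/DSA_A_TO_Z | Bit Manipulation/basic problems/convertBaseTwo.py | convertBaseTwoRecurr
-- ===== SOURCE A (Python) =====
-- def convertBaseTwoRecurrHelp(n,strr):
--     if n==1:
--         strr+="1"
--         return strr
--     if n==0:
--         strr+="0"
--         return strr
--     strr=convertBaseTwoRecurrHelp(n//2,strr)
--     if n%2:
--         strr+="1"
--     else:strr+="0"
--     return strr
--
-- def convertBaseTwoRecurr(n,strr):
--     if n<0:
--         strr=convertBaseTwoRecurrHelp(abs(n),strr)
--     else: strr=convertBaseTwoRecurrHelp(n,strr)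
--     x=""
--     if n<0:
--         x+="1"
--     else:x+="0"
--     for i in range(32-len(strr)-1):
--         x+="0"
--     x+=strr
--     return x
-- ===== SOURCE B (Python) =====
-- def convertBaseTwoRecurr(n, strr):
--     m = abs(n)
--     bits = ''
--     while m > 1:
--         bits = str(m % 2) + bits
--         m //= 2
--     bits = str(m) + bits  # final '1' or '0' (also covers n == 0)
--     full = strr + bits
--     sign = '1' if n < 0 else '0'
--     return sign + '0' * (32 - len(full) - 1) + full
-- ===== Notes on version B (the rewrite author's own statement) =====
-- stated objective: simpler
-- what changed: Replaces A's recursive helper (recursion on n//2, appending MSB-first on the way back up) by a single iterative while-loop over abs(n) that prepends the LSB digit each step, with the sign/padding computed by a string-repeat expression instead of A's character-by-character for-loop.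
import Mathlib
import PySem

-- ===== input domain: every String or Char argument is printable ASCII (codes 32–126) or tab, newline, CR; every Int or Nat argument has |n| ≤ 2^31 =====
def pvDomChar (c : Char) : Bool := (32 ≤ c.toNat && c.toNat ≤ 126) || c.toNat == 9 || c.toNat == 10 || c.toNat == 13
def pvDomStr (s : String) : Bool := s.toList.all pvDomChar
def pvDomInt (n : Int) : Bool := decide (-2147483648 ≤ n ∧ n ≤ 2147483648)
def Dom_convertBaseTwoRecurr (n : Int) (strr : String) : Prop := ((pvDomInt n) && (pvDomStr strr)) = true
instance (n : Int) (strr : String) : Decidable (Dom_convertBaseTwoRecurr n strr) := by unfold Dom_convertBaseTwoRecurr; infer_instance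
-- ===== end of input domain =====

-- B replaces A's helper recursion by a single iterative LSB-first loop that prepends digits into a string (no recursion, no helper call per bit level); same value everywhere.

-- ===== PORT A =====
-- A's helper is only ever called with abs(n) (a nonnegative int), so it is ported over Nat;
-- on that domain Nat./ and Nat.% coincide with Python's // and % exactly.
def convertBaseTwoRecurrHelp (n : Nat) (strr : String) : String :=
  if n = 1 then strr ++ "1"
  else if n = 0 then strr ++ "0"
  else
    let strr := convertBaseTwoRecurrHelp (n / 2) strr
    if n % 2 ≠ 0 then strr ++ "1" else strr ++ "0"
decreasing_by omega

def convertBaseTwoRecurr (n : Int) (strr : String) : String :=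
  let strr := if n < 0 then convertBaseTwoRecurrHelp n.natAbs strr
              else convertBaseTwoRecurrHelp n.toNat strr
  let x := if n < 0 then "" ++ "1" else "" ++ "0"
  let x := (PySem.List.pyRange 0 (32 - PySem.Str.len strr - 1) 1).foldl (fun x _ => x ++ "0") x
  x ++ strr

-- ===== PORT B =====
-- the while-loop of Source B: state (m, bits); prepends str(m % 2) while m > 1
def pvAltLoop (m : Nat) (bits : String) : Nat × String :=
  if 1 < m then pvAltLoop (m / 2) (PySem.Int.toStr ((m % 2 : Nat) : Int) ++ bits) else (m, bits)
decreasing_by omega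

def convertBaseTwoRecurr_alt (n : Int) (strr : String) : String :=
  let m := n.natAbs
  let p := pvAltLoop m ""
  let bits := PySem.Int.toStr (p.1 : Int) ++ p.2
  let full := strr ++ bits
  let sign := if n < 0 then "1" else "0"
  sign ++ String.ofList (PySem.List.pyRepeat ['0'] (32 - PySem.Str.len full - 1)) ++ full

-- ===== PRECONDITION & SPEC =====
def Spec_convertBaseTwoRecurr (n : Int) (strr : String) (out : String) : Prop := out = convertBaseTwoRecurr_alt n strr
instance (n : Int) (strr : String) (out : String) : Decidable (Spec_convertBaseTwoRecurr n strr out) := by unfold Spec_convertBaseTwoRecurr; infer_instance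

-- ===== CLAIM (what is proved, stated in full; the proofs are below) =====
def Claim_equal_convertBaseTwoRecurr : Prop := ∀ (n : Int) (strr : String), Dom_convertBaseTwoRecurr n strr → Spec_convertBaseTwoRecurr n strr (convertBaseTwoRecurr n strr)

-- ===== LEMMAS AND PROOFS =====

-- the binary-digit string (as a char list) both programs produce for the magnitude
def pvBin (n : Nat) : List Char :=
  if n = 1 then ['1']
  else if n = 0 then ['0']
  else pvBin (n / 2) ++ [if n % 2 ≠ 0 then '1' else '0']
decreasing_by omega

theorem pvBin_one : pvBin 1 = ['1'] := by rw [pvBin]; simp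
theorem pvBin_zero : pvBin 0 = ['0'] := by rw [pvBin]; simp
theorem pvBin_ge2 (n : Nat) (h : 2 ≤ n) :
    pvBin n = pvBin (n / 2) ++ [if n % 2 ≠ 0 then '1' else '0'] := by
  rw [pvBin]; simp [show n ≠ 1 by omega, show n ≠ 0 by omega]

theorem pvToChars_zero : PySem.Int.toChars 0 = ['0'] := rfl
theorem pvToChars_one : PySem.Int.toChars 1 = ['1'] := rfl

theorem pvHelp_toList (m : Nat) (strr : String) :
    (convertBaseTwoRecurrHelp m strr).toList = strr.toList ++ pvBin m := by
  fun_induction convertBaseTwoRecurrHelp m strr with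
  | case1 => simp_all [pvBin_one, String.toList_append]
  | case2 => simp_all [pvBin_zero, String.toList_append]
  | case3 =>
      rename_i nn h1 h2 hs hodd hih
      rw [show hs = convertBaseTwoRecurrHelp (nn / 2) strr from rfl,
        pvBin_ge2 nn (by omega)]
      simp [String.toList_append, hih, hodd]
  | case4 =>
      rename_i nn h1 h2 hs hodd hih
      rw [show hs = convertBaseTwoRecurrHelp (nn / 2) strr from rfl,
        pvBin_ge2 nn (by omega)]
      simp [String.toList_append, hih, hodd]

theorem pvAltLoop_toList (m : Nat) (bits : String) :
    (PySem.Int.toStr ((pvAltLoop m bits).1 : Int)).toList ++ (pvAltLoop m bits).2.toList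
      = pvBin m ++ bits.toList := by
  fun_induction pvAltLoop m bits with
  | case1 =>
      rename_i m bits h ih
      rw [ih, pvBin_ge2 m (by omega), String.toList_append, List.append_assoc]
      congr 1
      rcases Nat.mod_two_eq_zero_or_one m with h2 | h2 <;>
        simp [h2, pvToChars_zero, pvToChars_one]
  | case2 =>
      rename_i m bits h
      interval_cases m
      · simp [pvToChars_zero, pvBin_zero]
      · simp [pvToChars_one, pvBin_one]

theorem pvFold_zeros (l : List Int) (x : String) :
    (l.foldl (fun x _ => x ++ "0") x).toList = x.toList ++ List.replicate l.length '0' := by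
  induction l generalizing x with
  | nil => simp
  | cons a t ih =>
      simp [List.foldl_cons, ih, String.toList_append, List.replicate_succ]

-- ===== VERDICT (by name: the statement is the Claim_ definition above) =====
theorem convertBaseTwoRecurr_spec : Claim_equal_convertBaseTwoRecurr := by
  intro n strr _
  show convertBaseTwoRecurr n strr = convertBaseTwoRecurr_alt n strr
  have hB : (PySem.Int.toStr ((pvAltLoop n.natAbs "").1 : Int)).toList
      ++ (pvAltLoop n.natAbs "").2.toList = pvBin n.natAbs := by
    simpa using pvAltLoop_toList n.natAbs ""
  have hlen : (PySem.Int.toStr ((pvAltLoop n.natAbs "").1 : Int)).toList.length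
      + (pvAltLoop n.natAbs "").2.toList.length = (pvBin n.natAbs).length := by
    rw [← List.length_append, hB]
  apply String.ext
  unfold convertBaseTwoRecurr convertBaseTwoRecurr_alt
  by_cases hn : n < 0
  · rw [show (if n < 0 then convertBaseTwoRecurrHelp n.natAbs strr
        else convertBaseTwoRecurrHelp n.toNat strr) = convertBaseTwoRecurrHelp n.natAbs strr
        from by simp [hn]]
    simp [hn, pvFold_zeros, pvHelp_toList, PySem.List.length_pyRange_one,
      PySem.List.pyRepeat_singleton, PySem.Str.len_eq, String.toList_append,
      String.toList_ofList]
    have e2 : PySem.Int.toChars (((pvAltLoop n.natAbs "").1 : Nat) : Int)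
        ++ (pvAltLoop n.natAbs "").2.toList = pvBin n.natAbs := by
      simpa using hB
    have e4 : (((PySem.Int.toChars (((pvAltLoop n.natAbs "").1 : Nat) : Int)).length : Int)
        + ((pvAltLoop n.natAbs "").2.length : Int)) = ((pvBin n.natAbs).length : Int) := by
      have h5 := congrArg List.length e2
      simp only [List.length_append, String.length_toList] at h5
      omega
    rw [e4, e2]
  · rw [show (if n < 0 then convertBaseTwoRecurrHelp n.natAbs strr
        else convertBaseTwoRecurrHelp n.toNat strr) = convertBaseTwoRecurrHelp n.natAbs strr
        from by simp [hn, show n.toNat = n.natAbs by omega]]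
    simp [hn, pvFold_zeros, pvHelp_toList, PySem.List.length_pyRange_one,
      PySem.List.pyRepeat_singleton, PySem.Str.len_eq, String.toList_append,
      String.toList_ofList]
    have e2 : PySem.Int.toChars (((pvAltLoop n.natAbs "").1 : Nat) : Int)
        ++ (pvAltLoop n.natAbs "").2.toList = pvBin n.natAbs := by
      simpa using hB
    have e4 : (((PySem.Int.toChars (((pvAltLoop n.natAbs "").1 : Nat) : Int)).length : Int)
        + ((pvAltLoop n.natAbs "").2.length : Int)) = ((pvBin n.natAbs).length : Int) := by
      have h5 := congrArg List.length e2
      simp only [List.length_append, String.length_toList] at h5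
      omega
    rw [e4, e2]
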